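-- pv_equiv track=rewrite | github.com/shenith084/Encryption-Algorithms | rail_fence_cipher.py | visualize_fence
-- ===== SOURCE A (Python) =====
-- def visualize_fence(text, num_rails):
--     """
--     Visualizes the rail fence pattern for better understanding
--
--     Args:
--         text (str): Text to visualize
--         num_rails (int): Number of rails
--
--     Returns:
--         str: Visual representation of the fence
--     """
--     if num_rails <= 1:
--         return text
--
--     # Create visualization grid
--     fence = [[' ' for _ in range(len(text))] for _ in range(num_rails)]
--
--     current_rail = 0
--     direction = 1
--
--     for i, char in enumerate(text):
--         fence[current_rail][i] = char
--
--         if current_rail == 0: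
--             direction = 1
--         elif current_rail == num_rails - 1:
--             direction = -1
--
--         current_rail += direction
--
--     # Create visual representation
--     visualization = ""
--     for rail in fence:
--         visualization += ''.join(rail) + '\n'
--
--     return visualization.rstrip()
-- ===== SOURCE B (Python) =====
-- def visualize_fence(text, num_rails):
--     """Rail-by-rail rendering using a closed-form triangular-wave rail formula
--     instead of A's stateful direction toggle over a mutable grid."""
--     if num_rails <= 1:
--         return text
--
--     cycle = 2 * (num_rails - 1)
--
--     def rail_of(i):
--         m = i % cycle
--         return m if m < num_rails else cycle - m
--
--     rails = [rail_of(i) for i in range(len(text))]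
--     rows = []
--     for r in range(num_rails):
--         rows.append(''.join([text[i] if rails[i] == r else ' '
--                              for i in range(len(text))]))
--     return '\n'.join(rows).rstrip()
-- ===== Notes on version B (the rewrite author's own statement) =====
-- stated objective: alternative
-- what changed: Replaces the stateful direction-toggle walk over a mutable 2D grid with a closed-form triangular-wave rail formula (rail(i) = i%cycle folded at num_rails), building the output rail by rail and joining with '\n'.
import Mathlib
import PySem

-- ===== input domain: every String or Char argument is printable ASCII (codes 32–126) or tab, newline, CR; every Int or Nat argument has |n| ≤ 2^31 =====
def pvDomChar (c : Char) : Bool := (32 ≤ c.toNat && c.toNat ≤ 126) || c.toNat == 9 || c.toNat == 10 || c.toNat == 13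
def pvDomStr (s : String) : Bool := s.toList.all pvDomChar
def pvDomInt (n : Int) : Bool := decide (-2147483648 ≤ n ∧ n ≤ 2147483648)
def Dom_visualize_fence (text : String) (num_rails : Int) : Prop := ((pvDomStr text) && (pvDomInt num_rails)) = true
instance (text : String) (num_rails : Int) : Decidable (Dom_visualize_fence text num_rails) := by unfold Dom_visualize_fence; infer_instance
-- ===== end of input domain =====

-- B replaces A's stateful direction-toggle walk over a mutable grid by a closed-form
-- triangular-wave rail formula and builds the picture rail by rail (objective: alternative).

-- ===== PORT A =====
-- loop body of A's 'for i, char in enumerate(text)' (state: fence, current_rail, direction);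
-- indices are always in range, so getD/set are exact for Python's fence[current_rail][i] = char
def fenceStep (num_rails : Int) (st : List (List Char) × Int × Int) (p : Int × Char) :
    List (List Char) × Int × Int :=
  let fence := st.1
  let current_rail := st.2.1
  let direction := st.2.2
  let fence := fence.set current_rail.toNat
      ((fence.getD current_rail.toNat []).set p.1.toNat p.2)
  let direction := if current_rail = 0 then (1 : Int)
      else if current_rail = num_rails - 1 then -1 else direction
  (fence, current_rail + direction, direction)

def visualize_fence (text : String) (num_rails : Int) : String :=
  if num_rails ≤ 1 then text
  else
    let cs := text.toList
    let fence : List (List Char) :=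
      (List.range num_rails.toNat).map (fun _ => (List.range cs.length).map (fun _ => ' '))
    let st := (PySem.List.enumerate cs 0).foldl (fenceStep num_rails) (fence, 0, 1)
    let visualization := st.1.foldl (fun v rail => v ++ rail ++ ['\n']) ([] : List Char)
    String.ofList (PySem.Chars.rstrip visualization)

-- ===== PORT B =====
-- rail_of from Source B: closed-form triangular wave
def railOf (cycle num_rails i : Int) : Int :=
  let m := PySem.Int.mod i cycle
  if m < num_rails then m else cycle - m

def visualize_fence_alt (text : String) (num_rails : Int) : String :=
  if num_rails ≤ 1 then text
  else
    let cycle := 2 * (num_rails - 1)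
    let cs := text.toList
    let rails := (PySem.List.pyRange 0 (cs.length : Int)).map (fun i => railOf cycle num_rails i)
    let rows := (PySem.List.pyRange 0 num_rails).map (fun r =>
      (PySem.List.pyRange 0 (cs.length : Int)).map (fun i =>
        -- rails[i]: i is always in range, so pyGetD is exact
        if PySem.List.pyGetD rails i 0 = r then PySem.List.pyGetD cs i ' ' else ' '))
    String.ofList (PySem.Chars.rstrip (PySem.Chars.join ['\n'] rows))

-- ===== PRECONDITION & SPEC =====
def Spec_visualize_fence (text : String) (num_rails : Int) (out : String) : Prop := out = visualize_fence_alt text num_rails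
instance (text : String) (num_rails : Int) (out : String) : Decidable (Spec_visualize_fence text num_rails out) := by unfold Spec_visualize_fence; infer_instance

-- ===== CLAIM (what is proved, stated in full; the proofs are below) =====
def Claim_equal_visualize_fence : Prop := ∀ (text : String) (num_rails : Int), Dom_visualize_fence text num_rails → Spec_visualize_fence text num_rails (visualize_fence text num_rails)

-- ===== LEMMAS AND PROOFS =====

-- Nat-level rail formula, direction sign, and recursive direction state
def fN (N C j : Nat) : Nat := if j % C < N then j % C else C - j % C
def eN (N C k : Nat) : Int := if k % C < N - 1 then 1 else -1
def dN (N C : Nat) : Nat → Int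
  | 0 => 1
  | (k+1) => if fN N C k = 0 then 1 else if fN N C k = N - 1 then -1 else dN N C k

-- the grid after k steps of A's loop
def Tg (cs : List Char) (N C k : Nat) : List (List Char) :=
  (List.range N).map (fun r =>
    (List.range cs.length).map (fun j => if j < k ∧ fN N C j = r then cs.getD j ' ' else ' '))

lemma mod_succ (k C : Nat) (hC : 2 ≤ C) :
    (k+1) % C = if k % C + 1 = C then 0 else k % C + 1 := by
  have h1 : 1 % C = 1 := Nat.mod_eq_of_lt (by omega)
  have hk : k % C < C := Nat.mod_lt _ (by omega)
  rw [Nat.add_mod, h1]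
  split_ifs with h
  · rw [h, Nat.mod_self]
  · exact Nat.mod_eq_of_lt (by omega)

lemma fN_lt (N C j : Nat) (hN : 2 ≤ N) (hC : C = 2*(N-1)) : fN N C j < N := by
  have hj : j % C < C := Nat.mod_lt _ (by omega)
  unfold fN; split_ifs with h <;> omega

lemma dN_succ (N C : Nat) (hN : 2 ≤ N) (hC : C = 2*(N-1)) (k : Nat) :
    dN N C (k+1) = eN N C k := by
  induction k with
  | zero =>
      have h0 : (0:Nat) % C = 0 := Nat.zero_mod _
      show (if fN N C 0 = 0 then (1:Int) else if fN N C 0 = N - 1 then -1 else dN N C 0) = eN N C 0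
      unfold fN eN
      rw [h0]
      split_ifs <;> omega
  | succ k ih =>
      have hs := mod_succ k C (by omega)
      have hk : k % C < C := Nat.mod_lt _ (by omega)
      show (if fN N C (k+1) = 0 then (1:Int) else if fN N C (k+1) = N - 1 then -1 else dN N C (k+1)) = eN N C (k+1)
      rw [ih]
      unfold fN eN
      rw [hs]
      split_ifs <;> omega

lemma fN_succ (N C : Nat) (hN : 2 ≤ N) (hC : C = 2*(N-1)) (k : Nat) :
    (fN N C (k+1) : Int) = (fN N C k : Int) + eN N C k := by
  have hs := mod_succ k C (by omega)
  have hk : k % C < C := Nat.mod_lt _ (by omega)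
  unfold fN eN
  rw [hs]
  split_ifs <;> push_cast <;> omega

lemma set_map_range {α : Type} (m a : Nat) (h : Nat → α) (v : α) :
    ((List.range m).map h).set a v = (List.range m).map (fun t => if t = a then v else h t) := by
  apply List.ext_getElem
  · simp
  · intro i h1 h2
    simp only [List.getElem_set, List.getElem_map, List.getElem_range]
    by_cases hi : a = i
    · rw [if_pos hi, if_pos hi.symm]
    · rw [if_neg hi, if_neg (fun h => hi h.symm)]

lemma getD_map_range_lt {α : Type} (m a : Nat) (h : Nat → α) (d : α) (ha : a < m) :
    ((List.range m).map h).getD a d = h a := by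
  rw [List.getD_eq_getElem?_getD]
  simp [ha]

-- one step of A's loop from the invariant state
lemma step_inv (N C : Nat) (hN : 2 ≤ N) (hC : C = 2*(N-1)) (cs : List Char)
    (k : Nat) (hk : k < cs.length) (c : Char) (hc : cs.getD k ' ' = c) :
    fenceStep (N : Int) (Tg cs N C k, ((fN N C k : Nat) : Int), dN N C k) ((k : Int), c)
      = (Tg cs N C (k+1), ((fN N C (k+1) : Nat) : Int), dN N C (k+1)) := by
  have hfk : fN N C k < N := fN_lt N C k hN hC
  unfold fenceStep
  simp only [Int.toNat_natCast]
  have hdir : (if ((fN N C k : Nat) : Int) = 0 then (1:Int)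
      else if ((fN N C k : Nat) : Int) = (N : Int) - 1 then -1 else dN N C k) = dN N C (k+1) := by
    show _ = dN N C (k+1)
    simp only [dN]
    split_ifs <;> omega
  rw [hdir]
  have hrail : ((fN N C k : Nat) : Int) + dN N C (k+1) = ((fN N C (k+1) : Nat) : Int) := by
    rw [dN_succ N C hN hC, fN_succ N C hN hC]
  rw [hrail]
  have hgrid : (Tg cs N C k).set (fN N C k)
      (((Tg cs N C k).getD (fN N C k) []).set k c) = Tg cs N C (k+1) := by
    unfold Tg
    rw [getD_map_range_lt _ _ _ _ hfk, set_map_range, set_map_range]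
    apply List.map_congr_left
    intro r hr
    split_ifs with h1
    · subst h1
      apply List.map_congr_left
      intro j hj
      simp only [List.mem_range] at hj
      by_cases hjk : j = k
      · subst hjk
        rw [if_pos rfl, if_pos ⟨Nat.lt_succ_self j, rfl⟩]
        exact hc.symm
      · rw [if_neg hjk]
        have hiff : (j < k ∧ fN N C j = fN N C k) ↔ (j < k + 1 ∧ fN N C j = fN N C k) :=
          ⟨fun ⟨h, p⟩ => ⟨by omega, p⟩, fun ⟨h, p⟩ => ⟨by omega, p⟩⟩
        exact if_congr hiff rfl rfl
    · apply List.map_congr_left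
      intro j hj
      simp only [List.mem_range] at hj
      have hiff : (j < k ∧ fN N C j = r) ↔ (j < k + 1 ∧ fN N C j = r) := by
        constructor
        · exact fun ⟨h, p⟩ => ⟨by omega, p⟩
        · rintro ⟨h, p⟩
          refine ⟨?_, p⟩
          rcases Nat.lt_succ_iff_lt_or_eq.mp h with h' | h'
          · exact h'
          · subst h'; exact absurd p.symm h1
      exact if_congr hiff rfl rfl
  rw [hgrid]

-- A's whole loop computes the target grid
lemma loopA (N C : Nat) (hN : 2 ≤ N) (hC : C = 2*(N-1)) (cs : List Char) :
    ∀ (tl : List Char) (k : Nat), cs.drop k = tl →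
      (PySem.List.enumerate tl (k : Int)).foldl (fenceStep (N : Int))
          (Tg cs N C k, ((fN N C k : Nat) : Int), dN N C k)
        = (Tg cs N C (k + tl.length), ((fN N C (k + tl.length) : Nat) : Int),
           dN N C (k + tl.length)) := by
  intro tl
  induction tl with
  | nil => intro k _; simp [PySem.List.enumerate]
  | cons x xs ih =>
      intro k hdrop
      have hk : k < cs.length := by
        by_contra h
        rw [List.drop_eq_nil_of_le (by omega)] at hdrop
        exact absurd hdrop (by simp)
      have hx : cs.getD k ' ' = x := by
        have h0 : (cs.drop k)[0]? = some x := by rw [hdrop]; rfl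
        rw [List.getElem?_drop] at h0
        simp only [Nat.add_zero] at h0
        simp [List.getD_eq_getElem?_getD, h0]
      have hxs : cs.drop (k+1) = xs := by
        have h1 : List.drop 1 (List.drop k cs) = List.drop (k+1) cs := by
          rw [List.drop_drop]
        rw [← h1, hdrop]; rfl
      rw [PySem.List.enumerate_cons, List.foldl_cons,
          step_inv N C hN hC cs k hk x hx]
      have : ((k : Int) + 1) = ((k+1 : Nat) : Int) := by push_cast; ring
      rw [this, ih (k+1) hxs]
      simp only [List.length_cons]
      have h3 : k + 1 + xs.length = k + (xs.length + 1) := by omega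
      rw [h3]

-- the visualization fold is join-with-newline plus a trailing newline
lemma foldl_rows (rows : List (List Char)) (acc : List Char) (hne : rows ≠ []) :
    rows.foldl (fun v rail => v ++ rail ++ ['\n']) acc
      = acc ++ PySem.Chars.join ['\n'] rows ++ ['\n'] := by
  induction rows generalizing acc with
  | nil => exact absurd rfl hne
  | cons r rest ih =>
      cases rest with
      | nil => simp [PySem.Chars.join_singleton]
      | cons r2 rest2 =>
          rw [List.foldl_cons, ih _ (by simp), PySem.Chars.join_cons_cons]
          simp

lemma rstrip_append_newline (s : List Char) :
    PySem.Chars.rstrip (s ++ ['\n']) = PySem.Chars.rstrip s := by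
  simp [PySem.Chars.rstrip, List.dropWhile]
  rfl

-- B's rows are exactly the rows of the final grid
lemma rowsB_eq (N C : Nat) (hN : 2 ≤ N) (hC : C = 2*(N-1)) (cs : List Char) :
    (PySem.List.pyRange 0 (N : Int)).map (fun r =>
        (PySem.List.pyRange 0 (cs.length : Int)).map (fun i =>
          if PySem.List.pyGetD
              ((PySem.List.pyRange 0 (cs.length : Int)).map
                (fun i => railOf (2 * ((N : Int) - 1)) (N : Int) i)) i 0 = r
            then PySem.List.pyGetD cs i ' ' else ' '))
      = Tg cs N C cs.length := by
  unfold Tg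
  rw [PySem.List.pyRange_one, PySem.List.pyRange_one]
  simp only [Int.sub_zero, Int.toNat_natCast, List.map_map, Function.comp_def, zero_add]
  apply List.map_congr_left
  intro r hr
  simp only [List.mem_range] at hr
  apply List.map_congr_left
  intro j hj
  simp only [List.mem_range] at hj
  rw [PySem.List.pyGetD_natCast, getD_map_range_lt _ _ _ _ hj]
  have hrail : railOf (2 * ((N : Int) - 1)) (N : Int) ((j : Nat) : Int) = ((fN N C j : Nat) : Int) := by
    unfold railOf fN
    have hCc : (2 * ((N : Int) - 1)) = ((C : Nat) : Int) := by omega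
    rw [hCc]
    simp only [PySem.Int.mod_natCast]
    have hjC : j % C < C := Nat.mod_lt _ (by omega)
    split_ifs with h1 h2 h2 <;> omega
  rw [hrail]
  simp only [PySem.List.pyGetD_natCast]
  have hcast : (((fN N C j : Nat) : Int) = ((r : Nat) : Int)) ↔ (fN N C j = r) := Nat.cast_inj
  rw [if_congr hcast rfl rfl, if_congr (iff_of_eq (congrArg _ rfl)) rfl rfl]
  have hiff : (fN N C j = r) ↔ (j < cs.length ∧ fN N C j = r) :=
    ⟨fun p => ⟨hj, p⟩, fun p => p.2⟩
  exact if_congr hiff rfl rfl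

-- ===== VERDICT (by name: the statement is the Claim_ definition above) =====
theorem visualize_fence_spec : Claim_equal_visualize_fence := by
  intro text num_rails _
  unfold Spec_visualize_fence visualize_fence visualize_fence_alt
  by_cases hle : num_rails ≤ 1
  · simp [hle]
  · rw [if_neg hle, if_neg hle]
    dsimp only
    set N := num_rails.toNat with hNdef
    have hnum : num_rails = (N : Int) := by omega
    have hN : 2 ≤ N := by omega
    set C := 2*(N-1) with hCdef
    set cs := text.toList with hcs
    rw [hnum]
    -- initial state is the invariant state at step 0
    have harg : (((List.range N).map
          (fun _ => (List.range cs.length).map (fun _ => ' ')), (0 : Int), (1 : Int)))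
        = (Tg cs N C 0, ((fN N C 0 : Nat) : Int), dN N C 0) := by
      have h1 : ((List.range N).map
          (fun _ => (List.range cs.length).map (fun _ => ' '))) = Tg cs N C 0 := by
        unfold Tg
        apply List.map_congr_left; intro r _
        apply List.map_congr_left; intro j _
        simp
      have h2 : ((fN N C 0 : Nat) : Int) = 0 := by
        unfold fN; simp [Nat.zero_mod]; omega
      rw [h1, h2]; rfl
    have hloop := loopA N C hN rfl cs cs 0 (by simp)
    simp only [Nat.cast_zero, Nat.zero_add] at hloop
    rw [harg, hloop]
    -- rows are nonempty since N ≥ 2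
    have hrne : Tg cs N C cs.length ≠ [] := by
      unfold Tg
      simp [List.map_eq_nil_iff, List.range_eq_nil]
      omega
    rw [foldl_rows _ _ hrne, List.nil_append, rstrip_append_newline]
    rw [← rowsB_eq N C hN rfl cs]
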